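-- pv_equiv track=rewrite | github.com/violll/termProject_15-112 | mazeGenerator.py | getFalse
-- ===== SOURCE A (Python) =====
-- def getFalse(newChamber, oldRow, oldCol):
--     for row in range(len(newChamber)):
--         for col in range(len(newChamber[0])):
--             if newChamber[row][col] == False:
--                 if oldRow == row and col > oldCol:
--                     return row, col
--                 elif row > oldRow:
--                     return row, col
--     return -1, -1
-- ===== SOURCE B (Python) =====
-- def getFalse(newChamber, oldRow, oldCol):
--     if not newChamber:
--         return -1, -1
--     cols = len(newChamber[0])
--     total = len(newChamber) * cols
--     start = 0 if oldRow < 0 else oldRow * cols + min(max(oldCol + 1, 0), cols)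
--     for i in range(start, total):
--         r, c = divmod(i, cols)
--         if newChamber[r][c] == False:
--             return r, c
--     return -1, -1
-- ===== Notes on version B (the rewrite author's own statement) =====
-- stated objective: simpler
-- what changed: Replaces the nested row/column loops with per-cell position comparisons by computing a clamped linear start index once and running a single flat divmod scan for the first False cell.
-- outside the precondition, e.g. on getFalse([[False, False], [False]], -1, 0): A returns (0, 0), B returns (0, 0)
import Mathlib
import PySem

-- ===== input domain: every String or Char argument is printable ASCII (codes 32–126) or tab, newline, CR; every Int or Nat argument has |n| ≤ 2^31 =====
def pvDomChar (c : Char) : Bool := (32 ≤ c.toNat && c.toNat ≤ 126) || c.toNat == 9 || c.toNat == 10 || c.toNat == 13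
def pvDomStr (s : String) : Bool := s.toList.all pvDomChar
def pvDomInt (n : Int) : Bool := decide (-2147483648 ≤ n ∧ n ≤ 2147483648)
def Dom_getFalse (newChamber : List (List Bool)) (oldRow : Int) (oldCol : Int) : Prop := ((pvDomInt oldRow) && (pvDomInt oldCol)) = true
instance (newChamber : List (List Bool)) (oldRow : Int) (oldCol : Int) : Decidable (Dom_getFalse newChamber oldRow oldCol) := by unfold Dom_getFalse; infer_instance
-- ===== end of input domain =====

-- B replaces A's nested row/column loops (with per-cell position comparisons) by one flat
-- scan from an arithmetically computed, clamped linear start index; objective: simpler.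

-- ===== PORT A =====
-- inner 'for col in range(len(newChamber[0]))' loop of A
def getFalseColA (rowL : List Bool) (row oldRow oldCol : Int) : List Int → Option (Int × Int)
  | [] => none
  | col :: rest =>
    if PySem.List.pyGetD rowL col true = false then
      if oldRow = row ∧ col > oldCol then some (row, col)
      else if row > oldRow then some (row, col)
      else getFalseColA rowL row oldRow oldCol rest
    else getFalseColA rowL row oldRow oldCol rest

-- outer 'for row in range(len(newChamber))' loop of A
def getFalseRowA (nc : List (List Bool)) (cols0 oldRow oldCol : Int) : List Int → Option (Int × Int)
  | [] => none
  | row :: rest =>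
    match getFalseColA (PySem.List.pyGetD nc row []) row oldRow oldCol (PySem.List.pyRange 0 cols0 1) with
    | some p => some p
    | none => getFalseRowA nc cols0 oldRow oldCol rest

def getFalse (newChamber : List (List Bool)) (oldRow : Int) (oldCol : Int) : Int × Int :=
  (getFalseRowA newChamber (PySem.List.pyGetD newChamber 0 []).length oldRow oldCol
      (PySem.List.pyRange 0 newChamber.length 1)).getD (-1, -1)

-- ===== PORT B =====
-- 'for i in range(start, total)' loop of B
def getFalseLoopB (nc : List (List Bool)) (cols : Int) : List Int → Int × Int
  | [] => (-1, -1)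
  | i :: rest =>
    let r := PySem.Int.floordiv i cols
    let c := PySem.Int.mod i cols
    if PySem.List.pyGetD (PySem.List.pyGetD nc r []) c true = false then (r, c)
    else getFalseLoopB nc cols rest

def getFalse_alt (newChamber : List (List Bool)) (oldRow : Int) (oldCol : Int) : Int × Int :=
  match newChamber with
  | [] => (-1, -1)
  | r0 :: _ =>
    let cols : Int := r0.length
    let total : Int := newChamber.length * cols
    let start : Int := if oldRow < 0 then 0 else oldRow * cols + min (max (oldCol + 1) 0) cols
    getFalseLoopB newChamber cols (PySem.List.pyRange start total 1)

-- ===== PRECONDITION & SPEC =====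
-- Pre_ excludes ragged grids (some row shorter than the first): A raises IndexError as soon as
-- its scan reaches a missing cell; a few ragged grids on which A happens to return before
-- reaching the short row are excluded too, to keep the condition closed-form.
def Pre_getFalse (newChamber : List (List Bool)) (oldRow : Int) (oldCol : Int) : Prop :=
  ∀ row ∈ newChamber, (newChamber.headD []).length ≤ row.length
instance (newChamber : List (List Bool)) (oldRow : Int) (oldCol : Int) : Decidable (Pre_getFalse newChamber oldRow oldCol) := by unfold Pre_getFalse; infer_instance
def pvWitness_getFalse : List (List Bool) × Int × Int := ([[true, false], [false, true]], 0, 0)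

def Spec_getFalse (newChamber : List (List Bool)) (oldRow : Int) (oldCol : Int) (out : Int × Int) : Prop := out = getFalse_alt newChamber oldRow oldCol
instance (newChamber : List (List Bool)) (oldRow : Int) (oldCol : Int) (out : Int × Int) : Decidable (Spec_getFalse newChamber oldRow oldCol out) := by unfold Spec_getFalse; infer_instance

-- ===== CLAIM (what is proved, stated in full; the proofs are below) =====
def Claim_equal_getFalse : Prop := ∀ (newChamber : List (List Bool)) (oldRow : Int) (oldCol : Int), Dom_getFalse newChamber oldRow oldCol → Pre_getFalse newChamber oldRow oldCol → Spec_getFalse newChamber oldRow oldCol (getFalse newChamber oldRow oldCol)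

-- ===== LEMMAS AND PROOFS =====


-- qualifying-cell scan over linear indices (A's predicate, flat form)
def pvF (nc : List (List Bool)) (oR oC cols : Int) (i : Int) : Option (Int × Int) :=
  let r := PySem.Int.floordiv i cols
  let c := PySem.Int.mod i cols
  if PySem.List.pyGetD (PySem.List.pyGetD nc r []) c true = false ∧ (r > oR ∨ (r = oR ∧ c > oC)) then some (r, c) else none

-- B's per-index check, flat form
def pvG (nc : List (List Bool)) (cols : Int) (i : Int) : Option (Int × Int) :=
  let r := PySem.Int.floordiv i cols
  let c := PySem.Int.mod i cols
  if PySem.List.pyGetD (PySem.List.pyGetD nc r []) c true = false then some (r, c) else none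

theorem pv_findSome?_congr_mem {α β : Type} (l : List α) (f g : α → Option β)
    (h : ∀ x ∈ l, f x = g x) : l.findSome? f = l.findSome? g := by
  induction l with
  | nil => rfl
  | cons a l ih =>
    simp only [List.findSome?_cons]
    rw [h a (by simp)]
    cases g a with
    | none => exact ih (fun x hx => h x (by simp [hx]))
    | some b => rfl

theorem pv_colA_eq (rowL : List Bool) (row oR oC : Int) (l : List Int) :
    getFalseColA rowL row oR oC l
      = l.findSome? (fun col =>
          if PySem.List.pyGetD rowL col true = false ∧ (row > oR ∨ (row = oR ∧ col > oC))
          then some (row, col) else none) := by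
  induction l with
  | nil => rfl
  | cons col rest ih =>
    simp only [getFalseColA, List.findSome?_cons]
    by_cases hcell : PySem.List.pyGetD rowL col true = false
    · by_cases h1 : oR = row ∧ col > oC
      · rw [if_pos hcell, if_pos h1, if_pos ⟨hcell, Or.inr ⟨h1.1.symm, h1.2⟩⟩]
      · by_cases h2 : row > oR
        · rw [if_pos hcell, if_neg h1, if_pos h2, if_pos ⟨hcell, Or.inl h2⟩]
        · rw [if_pos hcell, if_neg h1, if_neg h2,
            if_neg (by rintro ⟨-, h | ⟨he, hgt⟩⟩; exact h2 h; exact h1 ⟨he.symm, hgt⟩)]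
          exact ih
    · rw [if_neg hcell, if_neg (by rintro ⟨h, -⟩; exact hcell h)]
      exact ih

theorem pv_rowA_eq (nc : List (List Bool)) (cols0 oR oC : Int) (l : List Int) :
    getFalseRowA nc cols0 oR oC l
      = l.findSome? (fun row =>
          getFalseColA (PySem.List.pyGetD nc row []) row oR oC (PySem.List.pyRange 0 cols0 1)) := by
  induction l with
  | nil => rfl
  | cons row rest ih =>
    simp only [getFalseRowA, List.findSome?_cons]
    cases getFalseColA (PySem.List.pyGetD nc row []) row oR oC (PySem.List.pyRange 0 cols0 1) with
    | none => exact ih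
    | some p => rfl

theorem pv_loopB_eq (nc : List (List Bool)) (cols : Int) (l : List Int) :
    getFalseLoopB nc cols l = (l.findSome? (pvG nc cols)).getD (-1, -1) := by
  induction l with
  | nil => rfl
  | cons i rest ih =>
    simp only [getFalseLoopB, List.findSome?_cons, pvG]
    by_cases hcell : PySem.List.pyGetD (PySem.List.pyGetD nc (PySem.Int.floordiv i cols) []) (PySem.Int.mod i cols) true = false
    · simp only [hcell, if_pos, Option.getD_some]
    · simp only [if_neg hcell]
      exact ih

theorem pv_divmod_block (r c cols : Int) (hc : 0 < cols) (h0 : 0 ≤ c) (h1 : c < cols) :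
    PySem.Int.floordiv (r * cols + c) cols = r ∧ PySem.Int.mod (r * cols + c) cols = c := by
  have hfd : PySem.Int.floordiv (r * cols + c) cols = r := by
    rw [PySem.Int.floordiv_eq_iff_of_pos hc]
    constructor
    · omega
    · rw [add_one_mul]; omega
  refine ⟨hfd, ?_⟩
  have h := PySem.Int.floordiv_mul_add_mod (r * cols + c) cols
  rw [hfd] at h
  omega

theorem pv_block_eq (nc : List (List Bool)) (oR oC r cols : Int) (hc : 0 < cols) :
    getFalseColA (PySem.List.pyGetD nc r []) r oR oC (PySem.List.pyRange 0 cols 1)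
      = (PySem.List.pyRange (r * cols) ((r + 1) * cols) 1).findSome? (pvF nc oR oC cols) := by
  rw [pv_colA_eq]
  have h2 : PySem.List.pyRange (r * cols) ((r + 1) * cols) 1
      = (PySem.List.pyRange 0 cols 1).map (fun c => r * cols + c) := by
    rw [PySem.List.pyRange_one, PySem.List.pyRange_one]
    have : (r + 1) * cols - r * cols = cols := by ring
    rw [this]
    simp [List.map_map, Function.comp]
  rw [h2, List.findSome?_map]
  apply pv_findSome?_congr_mem
  intro col hcol
  have hm := (PySem.List.mem_pyRange_one).mp hcol
  obtain ⟨hfd, hmd⟩ := pv_divmod_block r col cols hc (by omega) (by omega)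
  simp only [Function.comp, pvF, hfd, hmd]

theorem pv_nested (nc : List (List Bool)) (oR oC cols : Int) (hc : 0 < cols) :
    ∀ (k : Nat) (rs : Int),
      (PySem.List.pyRange rs (rs + k) 1).findSome? (fun row =>
          getFalseColA (PySem.List.pyGetD nc row []) row oR oC (PySem.List.pyRange 0 cols 1))
        = (PySem.List.pyRange (rs * cols) ((rs + k) * cols) 1).findSome? (pvF nc oR oC cols) := by
  intro k
  induction k with
  | zero =>
    intro rs
    simp only [Nat.cast_zero, add_zero]
    rw [PySem.List.pyRange_one_eq_nil le_rfl, PySem.List.pyRange_one_eq_nil le_rfl]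
    rfl
  | succ k ih =>
    intro rs
    have hcons : PySem.List.pyRange rs (rs + (k + 1 : Nat)) 1
        = rs :: PySem.List.pyRange (rs + 1) (rs + (k + 1 : Nat)) 1 :=
      PySem.List.pyRange_one_cons (by push_cast; omega)
    have hsplit : PySem.List.pyRange (rs * cols) ((rs + (k + 1 : Nat)) * cols) 1
        = PySem.List.pyRange (rs * cols) ((rs + 1) * cols) 1
            ++ PySem.List.pyRange ((rs + 1) * cols) ((rs + (k + 1 : Nat)) * cols) 1 :=
      PySem.List.pyRange_one_append _ _ _
        (mul_le_mul_of_nonneg_right (by omega) hc.le)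
        (mul_le_mul_of_nonneg_right (by push_cast; omega) hc.le)
    rw [hcons, hsplit, List.findSome?_cons, List.findSome?_append]
    have hih := ih (rs + 1)
    rw [show rs + 1 + (k : Int) = rs + ((k + 1 : Nat) : Int) by push_cast; ring] at hih
    rw [hih, pv_block_eq nc oR oC rs cols hc]
    cases (PySem.List.pyRange (rs * cols) ((rs + 1) * cols) 1).findSome? (pvF nc oR oC cols) with
    | none => simp [Option.or]
    | some p => simp [Option.or]

theorem pv_mod_bounds (i cols : Int) (hc : 0 < cols) :
    0 ≤ PySem.Int.mod i cols ∧ PySem.Int.mod i cols < cols := by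
  rw [PySem.Int.mod_eq_emod_of_pos hc]
  exact ⟨Int.emod_nonneg i (by omega), Int.emod_lt_of_pos i hc⟩

theorem pv_start_iff (oR oC cols i : Int) (hc : 0 < cols) (hi : 0 ≤ i) :
    (PySem.Int.floordiv i cols > oR
      ∨ (PySem.Int.floordiv i cols = oR ∧ PySem.Int.mod i cols > oC))
    ↔ (if oR < 0 then 0 else oR * cols + min (max (oC + 1) 0) cols) ≤ i := by
  set r := PySem.Int.floordiv i cols with hr
  set c := PySem.Int.mod i cols with hcdef
  have hrc : r * cols + c = i := PySem.Int.floordiv_mul_add_mod i cols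
  obtain ⟨hc0, hc1⟩ := pv_mod_bounds i cols hc
  have hr0 : 0 ≤ r := by
    by_contra hneg
    have : r ≤ -1 := by omega
    have := mul_le_mul_of_nonneg_right this hc.le
    omega
  by_cases hoR : oR < 0
  · rw [if_pos hoR]
    constructor
    · intro _; exact hi
    · intro _; exact Or.inl (by omega)
  · rw [if_neg hoR]
    have hm0 : 0 ≤ min (max (oC + 1) 0) cols := le_min (le_max_right _ _) hc.le
    have hm1 : min (max (oC + 1) 0) cols ≤ cols := min_le_right _ _
    rcases lt_trichotomy r oR with hlt | heq | hgt
    · have h1 : (r + 1) * cols ≤ oR * cols := mul_le_mul_of_nonneg_right (by omega) hc.le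
      rw [add_one_mul] at h1
      constructor
      · intro h; omega
      · intro h; exfalso; omega
    · subst heq
      constructor
      · rintro (h | ⟨-, h⟩)
        · omega
        · have : max (oC + 1) 0 ≤ c := by omega
          omega
      · intro h
        right
        refine ⟨rfl, ?_⟩
        have hcm : min (max (oC + 1) 0) cols ≤ c := by omega
        rcases le_total (max (oC + 1) 0) cols with hmc | hmc
        · rw [min_eq_left hmc] at hcm; omega
        · rw [min_eq_right hmc] at hcm; omega
    · have h1 : (oR + 1) * cols ≤ r * cols := mul_le_mul_of_nonneg_right (by omega) hc.le
      rw [add_one_mul] at h1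
      constructor
      · intro _; omega
      · intro _; exact Or.inl hgt

theorem pv_restrict (nc : List (List Bool)) (oR oC cols start total : Int) (hs0 : 0 ≤ start)
    (h : ∀ i, 0 ≤ i → pvF nc oR oC cols i = if start ≤ i then pvG nc cols i else none) :
    (PySem.List.pyRange 0 total 1).findSome? (pvF nc oR oC cols)
      = (PySem.List.pyRange start total 1).findSome? (pvG nc cols) := by
  by_cases hst : start ≤ total
  · rw [PySem.List.pyRange_one_append 0 start total hs0 hst, List.findSome?_append]
    have h1 : (PySem.List.pyRange 0 start 1).findSome? (pvF nc oR oC cols) = none := by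
      rw [List.findSome?_eq_none_iff]
      intro x hx
      have hm := (PySem.List.mem_pyRange_one).mp hx
      rw [h x hm.1, if_neg (by omega)]
    rw [h1, Option.none_or]
    apply pv_findSome?_congr_mem
    intro x hx
    have hm := (PySem.List.mem_pyRange_one).mp hx
    rw [h x (by omega), if_pos hm.1]
  · have h2 : PySem.List.pyRange start total 1 = [] := PySem.List.pyRange_one_eq_nil (by omega)
    rw [h2, show (List.findSome? (pvG nc cols) [] : Option (Int × Int)) = none from rfl,
      List.findSome?_eq_none_iff]
    intro x hx
    have hm := (PySem.List.mem_pyRange_one).mp hx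
    rw [h x hm.1, if_neg (by omega)]

theorem getFalse_main : ∀ (nc : List (List Bool)) (oR oC : Int),
    Pre_getFalse nc oR oC → getFalse nc oR oC = getFalse_alt nc oR oC := by
  intro nc oR oC _hPre
  cases nc with
  | nil =>
    have h0 : PySem.List.pyRange 0 (([] : List (List Bool)).length : Int) 1 = [] := by
      simp [PySem.List.pyRange_one_eq_nil]
    show (getFalseRowA [] _ oR oC (PySem.List.pyRange 0 (([] : List (List Bool)).length : Int) 1)).getD (-1, -1) = (-1, -1)
    rw [h0]
    rfl
  | cons r0 rest =>
    have hget0 : PySem.List.pyGetD (r0 :: rest) 0 [] = r0 := by simp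
    have hs0 : (0 : Int) ≤ (if oR < 0 then 0 else oR * (r0.length : Int) + min (max (oC + 1) 0) (r0.length : Int)) := by
      by_cases hoR : oR < 0
      · rw [if_pos hoR]
      · rw [if_neg hoR]
        have h1 : (0 : Int) ≤ oR * (r0.length : Int) := mul_nonneg (by omega) (by positivity)
        have h2 : (0 : Int) ≤ min (max (oC + 1) 0) (r0.length : Int) :=
          le_min (le_max_right _ _) (by positivity)
        omega
    have hB : getFalse_alt (r0 :: rest) oR oC
        = getFalseLoopB (r0 :: rest) (r0.length : Int)
            (PySem.List.pyRange
              (if oR < 0 then 0 else oR * (r0.length : Int) + min (max (oC + 1) 0) (r0.length : Int))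
              (((r0 :: rest).length : Int) * (r0.length : Int)) 1) := rfl
    have hA : getFalse (r0 :: rest) oR oC
        = ((PySem.List.pyRange 0 (((r0 :: rest).length : Int)) 1).findSome? (fun row =>
            getFalseColA (PySem.List.pyGetD (r0 :: rest) row []) row oR oC
              (PySem.List.pyRange 0 (r0.length : Int) 1))).getD (-1, -1) := by
      unfold getFalse
      rw [hget0, pv_rowA_eq]
    by_cases hc : 0 < (r0.length : Int)
    · have hnest := pv_nested (r0 :: rest) oR oC (r0.length : Int) hc ((r0 :: rest).length) 0
      simp only [zero_add, zero_mul] at hnest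
      rw [hA, hnest, hB, pv_loopB_eq]
      congr 1
      apply pv_restrict (r0 :: rest) oR oC (r0.length : Int) _ _ hs0
      intro i hi
      have hiff := pv_start_iff oR oC (r0.length : Int) i hc hi
      simp only [pvF, pvG]
      by_cases hq : (if oR < 0 then 0 else oR * (r0.length : Int) + min (max (oC + 1) 0) (r0.length : Int)) ≤ i
      · rw [if_pos hq]
        by_cases hcell : PySem.List.pyGetD (PySem.List.pyGetD (r0 :: rest) (PySem.Int.floordiv i (r0.length : Int)) []) (PySem.Int.mod i (r0.length : Int)) true = false
        · rw [if_pos ⟨hcell, hiff.mpr hq⟩, if_pos hcell]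
        · rw [if_neg (by rintro ⟨h, -⟩; exact hcell h), if_neg hcell]
      · rw [if_neg hq]
        exact if_neg (by rintro ⟨-, hqual⟩; exact hq (hiff.mp hqual))
    · have hlen : r0.length = 0 := by omega
      have htot : ((r0 :: rest).length : Int) * (r0.length : Int) = 0 := by
        rw [hlen]; simp
      have hA2 : getFalse (r0 :: rest) oR oC = (-1, -1) := by
        rw [hA]
        have hcols : PySem.List.pyRange 0 (r0.length : Int) 1 = [] := by
          rw [hlen]; simp [PySem.List.pyRange_one_eq_nil]
        rw [List.findSome?_eq_none_iff.mpr (fun x _ => by rw [hcols]; rfl)]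
        rfl
      have hB2 : getFalse_alt (r0 :: rest) oR oC = (-1, -1) := by
        rw [hB, htot, PySem.List.pyRange_one_eq_nil hs0]
        rfl
      rw [hA2, hB2]


-- ===== VERDICT (by name: the statement is the Claim_ definition above) =====
theorem getFalse_spec : Claim_equal_getFalse := by
  intro nc oR oC _hDom hPre
  exact getFalse_main nc oR oC hPre
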